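-- pv_equiv track=rewrite | github.com/adityagoel4512/EPIJudge | epi_judge_python/smallest_subarray_covering_set.py | find_smallest_subarray_covering_set
-- ===== SOURCE A (Python) =====
-- import collections
-- from typing import List, Set
--
-- Subarray = collections.namedtuple('Subarray', ('start', 'end'))
--
-- def find_smallest_subarray_covering_set(paragraph: List[str],
--                                         keywords: Set[str]) -> Subarray:
--     left = 0
--     smallest_subarray = Subarray(-1, len(paragraph)+1)
--     remaining_to_cover = len(keywords)
--     covered_keywords = collections.Counter()
--     for right, word in enumerate(paragraph):
--         # not covering all currently
--         if word in keywords: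
--             # add to covered
--             covered_keywords[word] += 1
--             if covered_keywords[word] == 1:
--                 remaining_to_cover -= 1
--             while left <= right and remaining_to_cover == 0:
--                 # covering everything here
--                 smallest_subarray = min(smallest_subarray, Subarray(left, right), key=lambda s:s.end-s.start)
--                 if paragraph[left] in covered_keywords:
--                     covered_keywords[paragraph[left]] -= 1
--                     if covered_keywords[paragraph[left]] == 0:
--                         remaining_to_cover += 1
--                 left += 1
--
--
--
--     return smallest_subarray if smallest_subarray.start != -1 else Subarray(-1, -1)
-- ===== SOURCE B (Python) =====
-- def find_smallest_subarray_covering_set(paragraph, keywords):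
--     # One pass keeping, for each keyword, the index of its latest occurrence;
--     # a window candidate is (min of those indices, current index).
--     best = (-1, len(paragraph) + 1)
--     latest = {}
--     for right, word in enumerate(paragraph):
--         if word in keywords:
--             latest[word] = right
--             if len(latest) == len(keywords):
--                 start = min(latest.values())
--                 if right - start < best[1] - best[0]:
--                     best = (start, right)
--     return best if best[0] != -1 else (-1, -1)
-- ===== Notes on version B (the rewrite author's own statement) =====
-- stated objective: simpler
-- what changed: Replaces the Counter + shrinking left-pointer sliding window with a single pass that records each keyword's latest occurrence index in a dict and, whenever all keywords have been seen, takes min(latest.values()) as the window start.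
import Mathlib
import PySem

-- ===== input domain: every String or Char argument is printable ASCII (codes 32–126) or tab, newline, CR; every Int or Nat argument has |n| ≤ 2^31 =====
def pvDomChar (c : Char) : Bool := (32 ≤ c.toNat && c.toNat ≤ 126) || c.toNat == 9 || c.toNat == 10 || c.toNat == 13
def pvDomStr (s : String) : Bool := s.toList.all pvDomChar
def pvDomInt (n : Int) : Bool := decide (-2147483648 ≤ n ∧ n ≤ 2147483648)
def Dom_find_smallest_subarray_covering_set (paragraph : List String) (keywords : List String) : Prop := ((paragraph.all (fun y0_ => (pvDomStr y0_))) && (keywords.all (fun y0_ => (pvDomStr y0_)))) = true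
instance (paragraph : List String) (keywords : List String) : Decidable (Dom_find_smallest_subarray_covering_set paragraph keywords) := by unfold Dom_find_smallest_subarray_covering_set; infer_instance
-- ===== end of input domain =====

-- B replaces A's Counter + shrinking-left-pointer window with a latest-occurrence
-- dict and min of its values (simpler; measured faster by a constant factor, since the
-- per-element Counter increments and window-shrinking decrements disappear); equal
-- return value on all inputs.

-- ===== PORT A =====
-- the inner 'while left <= right and remaining_to_cover == 0' loop of A
def pvWhileA (paragraph : List String) (right : Int) (left : Int)
    (counts : PySem.Dict String Int) (remaining : Int) (best : Int × Int) :
    Int × PySem.Dict String Int × Int × (Int × Int) :=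
  if h : left ≤ right ∧ remaining = 0 then
    -- min(smallest_subarray, Subarray(left, right), key=λs. s.end-s.start): keeps the old one on ties
    let best' := if right - left < best.2 - best.1 then (left, right) else best
    match PySem.List.pyGet? paragraph left with
    | none => (left, counts, remaining, best')  -- unreachable: 0 ≤ left ≤ right < len(paragraph) at every call
    | some x =>
      if counts.contains x then
        let counts' := counts.modify x 0 (· - 1)
        if counts'.getD x 0 = 0 then
          pvWhileA paragraph right (left + 1) counts' (remaining + 1) best'
        else
          pvWhileA paragraph right (left + 1) counts' remaining best'
      else
        pvWhileA paragraph right (left + 1) counts remaining best'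
  else (left, counts, remaining, best)
termination_by (right + 1 - left).toNat
decreasing_by all_goals omega

-- the outer 'for right, word in enumerate(paragraph)' loop of A
def pvGoA (paragraph keywords : List String) (rest : List String) (right left : Int)
    (counts : PySem.Dict String Int) (remaining : Int) (best : Int × Int) : Int × Int :=
  match rest with
  | [] => best
  | w :: rest' =>
    if w ∈ keywords then
      let counts1 := counts.modify w 0 (· + 1)
      let remaining1 := if counts1.getD w 0 = 1 then remaining - 1 else remaining
      let s := pvWhileA paragraph right left counts1 remaining1 best
      pvGoA paragraph keywords rest' (right + 1) s.1 s.2.1 s.2.2.1 s.2.2.2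
    else
      pvGoA paragraph keywords rest' (right + 1) left counts remaining best

def find_smallest_subarray_covering_set (paragraph : List String) (keywords : List String) : Int × Int :=
  let best := pvGoA paragraph keywords paragraph 0 0 PySem.Dict.empty (keywords.length : Int)
      (-1, (paragraph.length : Int) + 1)
  if best.1 ≠ -1 then best else (-1, -1)

-- ===== PORT B =====
def pvGoB (keywords : List String) (rest : List String) (right : Int)
    (latest : PySem.Dict String Int) (best : Int × Int) : Int × Int :=
  match rest with
  | [] => best
  | w :: rest' =>
    if w ∈ keywords then
      let latest' := latest.insert w right
      if (latest'.size : Int) = (keywords.length : Int) then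
        let best' :=
          match PySem.List.min? latest'.values (fun v => v) with
          | some start => if right - start < best.2 - best.1 then (start, right) else best
          | none => best  -- unreachable: latest' is nonempty here
        pvGoB keywords rest' (right + 1) latest' best'
      else
        pvGoB keywords rest' (right + 1) latest' best
    else
      pvGoB keywords rest' (right + 1) latest best

def find_smallest_subarray_covering_set_alt (paragraph : List String) (keywords : List String) : Int × Int :=
  let best := pvGoB keywords paragraph 0 PySem.Dict.empty (-1, (paragraph.length : Int) + 1)
  if best.1 ≠ -1 then best else (-1, -1)

-- ===== PRECONDITION & SPEC =====
def Spec_find_smallest_subarray_covering_set (paragraph : List String) (keywords : List String) (out : Int × Int) : Prop := out = find_smallest_subarray_covering_set_alt paragraph keywords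
instance (paragraph : List String) (keywords : List String) (out : Int × Int) : Decidable (Spec_find_smallest_subarray_covering_set paragraph keywords out) := by unfold Spec_find_smallest_subarray_covering_set; infer_instance

-- ===== CLAIM (what is proved, stated in full; the proofs are below) =====
def Claim_equal_find_smallest_subarray_covering_set : Prop := ∀ (paragraph : List String) (keywords : List String), Dom_find_smallest_subarray_covering_set paragraph keywords → Spec_find_smallest_subarray_covering_set paragraph keywords (find_smallest_subarray_covering_set paragraph keywords)

-- ===== LEMMAS AND PROOFS =====

-- index of the LAST occurrence of w in l
def lastIdx : List String → String → Option Nat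
  | [], _ => none
  | x :: xs, w =>
    match lastIdx xs w with
    | some i => some (i + 1)
    | none => if x = w then some 0 else none

theorem lastIdx_eq_none_iff (l : List String) (w : String) : lastIdx l w = none ↔ w ∉ l := by
  induction l with
  | nil => simp [lastIdx]
  | cons x xs ih =>
    simp only [lastIdx, List.mem_cons]
    cases h : lastIdx xs w with
    | some i =>
      have hw : w ∈ xs := by
        by_contra hc; rw [ih.mpr hc] at h; cases h
      simp [hw]
    | none =>
      have hw : w ∉ xs := ih.mp h
      by_cases hx : x = w
      · subst hx; simp
      · rw [if_neg hx]
        constructor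
        · rintro - (h1 | h1)
          · exact hx h1.symm
          · exact hw h1
        · intro _; rfl
theorem lastIdx_snoc (l : List String) (x w : String) :
    lastIdx (l ++ [x]) w = if w = x then some l.length else lastIdx l w := by
  induction l with
  | nil =>
    simp only [List.nil_append, lastIdx, List.length_nil]
    by_cases h : w = x
    · rw [if_pos h.symm, if_pos h]
    · rw [if_neg (fun hh => h hh.symm), if_neg h]
  | cons y ys ih =>
    simp only [List.cons_append, lastIdx, ih]
    by_cases h : w = x
    · simp [h, List.length_cons]
    · simp only [if_neg h]

theorem lastIdx_spec (l : List String) (w : String) (i : Nat) (h : lastIdx l w = some i) :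
    i < l.length ∧ l[i]? = some w ∧ w ∉ l.drop (i + 1) := by
  induction l generalizing i with
  | nil => simp [lastIdx] at h
  | cons x xs ih =>
    simp only [lastIdx] at h
    cases hx : lastIdx xs w with
    | some j =>
      rw [hx] at h
      obtain ⟨h1, h2, h3⟩ := ih j hx
      cases h
      exact ⟨by simpa using h1, by simpa using h2, by simpa using h3⟩
    | none =>
      rw [hx] at h
      by_cases hxw : x = w
      · rw [if_pos hxw] at h
        cases h
        refine ⟨by simp, by simp [hxw], ?_⟩
        simpa using (lastIdx_eq_none_iff xs w).mp hx
      · rw [if_neg hxw] at h; cases h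
theorem mem_drop_iff_lastIdx (l : List String) (w : String) (j : Nat) :
    w ∈ l.drop j ↔ ∃ i, lastIdx l w = some i ∧ j ≤ i := by
  constructor
  · intro hm
    have hw : w ∈ l := List.mem_of_mem_drop hm
    cases hli : lastIdx l w with
    | none => exact absurd hw ((lastIdx_eq_none_iff l w).mp hli)
    | some i =>
      refine ⟨i, rfl, ?_⟩
      by_contra hlt
      push_neg at hlt
      obtain ⟨-, -, h3⟩ := lastIdx_spec l w i hli
      have hdd : l.drop j = (l.drop (i + 1)).drop (j - (i + 1)) := by
        rw [List.drop_drop]; congr 1; omega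
      rw [hdd] at hm
      exact h3 (List.mem_of_mem_drop hm)
  · rintro ⟨i, hli, hji⟩
    obtain ⟨h1, h2, -⟩ := lastIdx_spec l w i hli
    have hg : (l.drop j)[i - j]? = some w := by
      rw [List.getElem?_drop, show j + (i - j) = i from by omega, h2]
    exact List.mem_of_getElem? hg

-- lift an optional index to Int
def liftIdx (o : Option Nat) : Option Int := o.map Int.ofNat

-- countP of a "membership extended by one element x" predicate over a Nodup list
theorem countP_mem_extend (S : List String) (hS : S.Nodup) (x : String)
    (p q : String → Bool)
    (hp : ∀ y, p y = true ↔ (y = x ∨ q y = true)) :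
    S.countP p = S.countP q + (if x ∈ S ∧ q x = false then 1 else 0) := by
  induction S with
  | nil => simp
  | cons a S' ih =>
    have ha : a ∉ S' := (List.nodup_cons.mp hS).1
    rw [List.countP_cons, List.countP_cons, ih (List.nodup_cons.mp hS).2]
    by_cases hax : a = x
    · subst hax
      by_cases hqa : q a = true
      · have hpa : p a = true := (hp a).mpr (Or.inr hqa)
        simp [hpa, hqa, ha]
      · have hpa : p a = true := (hp a).mpr (Or.inl rfl)
        have hqa' : q a = false := Bool.eq_false_iff.mpr hqa
        simp [hpa, hqa', ha]
    · have hpa : p a = q a := by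
        by_cases hqa : q a = true
        · rw [hqa]; exact (hp a).mpr (Or.inr hqa)
        · have hne : p a ≠ true := fun hp' => ((hp a).mp hp').elim (fun h1 => hax h1) (fun h1 => hqa h1)
          rw [Bool.eq_false_iff.mpr hne, Bool.eq_false_iff.mpr hqa]
      rw [hpa]
      have hmem : (x ∈ a :: S') ↔ (x ∈ S') := by
        rw [List.mem_cons]
        exact ⟨fun h1 => h1.elim (fun h2 => absurd h2.symm hax) id, Or.inr⟩
      by_cases hxS : x ∈ S' <;> by_cases hqx : q x = false <;>
        simp [hmem, hxS, hqx] <;> omega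


-- xs[(l : Int)] for l < |cur| reads inside cur
theorem pyGet?_append_lt (cur rest' : List String) (l : Nat) (h : l < cur.length) :
    PySem.List.pyGet? (cur ++ rest') (l : Int) = some cur[l] := by
  rw [PySem.List.pyGet?_natCast, List.getElem?_append_left (by omega),
    List.getElem?_eq_getElem h]

-- number of distinct keywords present in the window cur.drop l
def covcnt (keywords cur : List String) (l : Nat) : Nat :=
  keywords.dedup.countP (fun y => decide (y ∈ cur.drop l))

theorem covcnt_le_dedup (keywords cur : List String) (l : Nat) :
    covcnt keywords cur l ≤ keywords.dedup.length := List.countP_le_length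

theorem dedup_len_le (keywords : List String) : keywords.dedup.length ≤ keywords.length :=
  keywords.dedup_sublist.length_le

theorem covcnt_succ (keywords cur : List String) (l : Nat) (h : l < cur.length) :
    covcnt keywords cur l
      = covcnt keywords cur (l + 1)
        + (if cur[l] ∈ keywords.dedup ∧ cur[l] ∉ cur.drop (l + 1) then 1 else 0) := by
  have hdrop : cur.drop l = cur[l] :: cur.drop (l + 1) := List.drop_eq_getElem_cons h
  unfold covcnt
  rw [countP_mem_extend keywords.dedup keywords.nodup_dedup cur[l]
    (fun y => decide (y ∈ cur.drop l))
    (fun y => decide (y ∈ cur.drop (l + 1)))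
    (by intro y; simp only [decide_eq_true_eq, List.mem_cons, hdrop])]
  congr 1
  by_cases h1 : cur[l] ∈ keywords.dedup <;> by_cases h2 : cur[l] ∈ cur.drop (l + 1) <;>
    simp [h1, h2]

theorem covcnt_snoc (keywords cur : List String) (w : String) (l : Nat) (h : l ≤ cur.length) :
    covcnt keywords (cur ++ [w]) l
      = covcnt keywords cur l
        + (if w ∈ keywords.dedup ∧ w ∉ cur.drop l then 1 else 0) := by
  have hdrop : (cur ++ [w]).drop l = cur.drop l ++ [w] := List.drop_append_of_le_length h
  unfold covcnt
  rw [countP_mem_extend keywords.dedup keywords.nodup_dedup w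
    (fun y => decide (y ∈ (cur ++ [w]).drop l))
    (fun y => decide (y ∈ cur.drop l))
    (by intro y; simp only [decide_eq_true_eq, List.mem_append, List.mem_singleton, hdrop]; tauto)]
  congr 1
  by_cases h1 : w ∈ keywords.dedup <;> by_cases h2 : w ∈ cur.drop l <;> simp [h1, h2]

theorem covcnt_all (keywords cur : List String) (l : Nat)
    (hSK : keywords.dedup.length = keywords.length)
    (hall : ∀ k ∈ keywords.dedup, k ∈ cur.drop l) :
    covcnt keywords cur l = keywords.length := by
  unfold covcnt
  rw [List.countP_eq_length.mpr (fun a hA => by simpa using hall a hA)]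
  exact hSK

theorem covcnt_lt (keywords cur : List String) (l : Nat) (k0 : String)
    (hk0 : k0 ∈ keywords.dedup) (hnot : k0 ∉ cur.drop l) :
    covcnt keywords cur l < keywords.dedup.length := by
  refine lt_of_le_of_ne (covcnt_le_dedup keywords cur l) (fun heq => ?_)
  have := List.countP_eq_length.mp heq k0 hk0
  simp at this
  exact hnot this

-- invariant for A's state: counts are the window counts, remaining the uncovered count
def InvA (keywords cur : List String) (l : Nat) (counts : PySem.Dict String Int)
    (remaining : Int) : Prop :=
  (∀ x : String, counts.contains x = (decide (x ∈ keywords) && decide (x ∈ cur))) ∧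
  (∀ x ∈ keywords, counts.getD x 0 = (((cur.drop l).count x : Nat) : Int)) ∧
  remaining = (keywords.length : Int) - (covcnt keywords cur l : Int)

-- A's inner while loop walks left up to m+1 where m is the minimal latest-occurrence
-- index of a keyword, and the accumulated mins collapse to min(best, (m, right))
theorem whileA_spec (keywords cur rest' : List String) (r : Nat)
    (hr : cur.length = r + 1)
    (hSK : keywords.dedup.length = keywords.length)
    (m : Nat) (hm : ∃ k ∈ keywords.dedup, lastIdx cur k = some m)
    (hmin : ∀ k ∈ keywords.dedup, ∃ i, lastIdx cur k = some i ∧ m ≤ i) :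
    ∀ (n l : Nat) (counts : PySem.Dict String Int) (remaining : Int) (best : Int × Int),
      m - l = n → l ≤ m →
      InvA keywords cur l counts remaining →
      ∃ counts₂ remaining₂,
        pvWhileA (cur ++ rest') (r : Int) (l : Int) counts remaining best
          = ((m : Int) + 1, counts₂, remaining₂,
             if (r : Int) - (m : Int) < best.2 - best.1 then ((m : Int), (r : Int)) else best)
        ∧ InvA keywords cur (m + 1) counts₂ remaining₂ ∧ 1 ≤ remaining₂ := by
  -- facts about m
  obtain ⟨k0, hk0S, hk0⟩ := hm
  obtain ⟨hmlt, hk0get, hk0last⟩ := lastIdx_spec cur k0 m hk0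
  intro n
  induction n with
  | zero =>
    intro l counts remaining best hn hlm hInv
    have hlme : l = m := by omega
    subst hlme
    -- remaining = 0 since the window covers all keywords
    have hall : ∀ k ∈ keywords.dedup, k ∈ cur.drop l := by
      intro k hk
      obtain ⟨i, hi, hmi⟩ := hmin k hk
      exact (mem_drop_iff_lastIdx cur k l).mpr ⟨i, hi, le_trans (le_refl l) hmi⟩
    have hrem0 : remaining = 0 := by
      rw [hInv.2.2, covcnt_all keywords cur l hSK hall]; omega
    have hx : cur[l] = k0 := by
      have := List.getElem?_eq_getElem hmlt
      rw [hk0get] at this; exact (Option.some.inj this).symm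
    have hxkw : cur[l] ∈ keywords := by rw [hx]; exact List.mem_dedup.mp hk0S
    have hxcur : cur[l] ∈ cur := List.mem_of_getElem? (List.getElem?_eq_getElem hmlt)
    have hcontains : counts.contains cur[l] = true := by
      rw [hInv.1]
      simp [hxkw, hxcur]
    have hcnt : (cur.drop (l + 1)).count cur[l] = 0 := by
      rw [hx]; exact List.count_eq_zero.mpr hk0last
    have hgetd : (counts.modify cur[l] 0 (· - 1)).getD cur[l] 0 = 0 := by
      rw [PySem.Dict.getD_modify_self, hInv.2.1 cur[l] hxkw]
      rw [List.drop_eq_getElem_cons hmlt, List.count_cons_self, hcnt]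
      simp
    rw [pvWhileA]
    rw [dif_pos ⟨by omega, hrem0⟩]
    rw [pyGet?_append_lt cur rest' l hmlt]
    simp only [hcontains, if_true, hgetd, if_pos rfl]
    rw [pvWhileA]
    rw [dif_neg (by omega)]
    refine ⟨counts.modify cur[l] 0 (· - 1), remaining + 1, rfl, ⟨?_, ?_, ?_⟩, by omega⟩
    · intro y
      rw [PySem.Dict.contains_modify, hInv.1 y]
      by_cases hyx : y = cur[l]
      · subst hyx
        simp [hxkw, hxcur]
      · simp [hyx]
    · intro y hy
      rw [PySem.Dict.getD_modify]
      by_cases hyx : y = cur[l]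
      · rw [if_pos hyx, hInv.2.1 cur[l] hxkw, hyx, List.drop_eq_getElem_cons hmlt,
          List.count_cons_self, hcnt]
        simp
      · rw [if_neg hyx, hInv.2.1 y hy, List.drop_eq_getElem_cons hmlt,
          List.count_cons_of_ne (Ne.symm hyx)]
    · have hc := covcnt_succ keywords cur l hmlt
      rw [if_pos ⟨hx ▸ hk0S, hx ▸ hk0last⟩] at hc
      have hKc := covcnt_all keywords cur l hSK hall
      rw [hInv.2.2]
      omega
  | succ n ih =>
    intro l counts remaining best hn hlm hInv
    have hll : l < m := by omega
    have hllt : l < cur.length := by omega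
    have hall : ∀ k ∈ keywords.dedup, k ∈ cur.drop l := by
      intro k hk
      obtain ⟨i, hi, hmi⟩ := hmin k hk
      exact (mem_drop_iff_lastIdx cur k l).mpr ⟨i, hi, by omega⟩
    have hall1 : ∀ k ∈ keywords.dedup, k ∈ cur.drop (l + 1) := by
      intro k hk
      obtain ⟨i, hi, hmi⟩ := hmin k hk
      exact (mem_drop_iff_lastIdx cur k (l + 1)).mpr ⟨i, hi, by omega⟩
    have hrem0 : remaining = 0 := by
      rw [hInv.2.2, covcnt_all keywords cur l hSK hall]; omega
    have hcov1 : covcnt keywords cur (l + 1) = keywords.length :=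
      covcnt_all keywords cur (l + 1) hSK hall1
    rw [pvWhileA]
    rw [dif_pos ⟨by omega, hrem0⟩]
    rw [pyGet?_append_lt cur rest' l hllt]
    set x := cur[l] with hxdef
    have hbest' :
        ∀ best' : Int × Int,
          best' = (if (r : Int) - (l : Int) < best.2 - best.1 then ((l : Int), (r : Int)) else best) →
          (if (r : Int) - (m : Int) < best'.2 - best'.1 then ((m : Int), (r : Int)) else best')
            = (if (r : Int) - (m : Int) < best.2 - best.1 then ((m : Int), (r : Int)) else best) := by
      intro best' hb
      by_cases h1 : (r : Int) - (l : Int) < best.2 - best.1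
      · rw [hb, if_pos h1]
        have : ((r : Int) - (m : Int) < (r : Int) - (l : Int)) := by omega
        rw [if_pos this, if_pos (by omega)]
      · rw [hb, if_neg h1]
    by_cases hxk : x ∈ keywords
    · have hxcur : x ∈ cur := by
        rw [hxdef]; exact List.mem_of_getElem? (List.getElem?_eq_getElem hllt)
      have hcontains : counts.contains x = true := by
        rw [hInv.1]
        simp [hxk, hxcur]
      have hxS : x ∈ keywords.dedup := List.mem_dedup.mpr hxk
      have hxdrop : x ∈ cur.drop (l + 1) := hall1 x hxS
      have hgetd : (counts.modify x 0 (· - 1)).getD x 0 = (((cur.drop (l + 1)).count x : Nat) : Int) := by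
        rw [PySem.Dict.getD_modify_self, hInv.2.1 x hxk, List.drop_eq_getElem_cons hllt,
          ← hxdef, List.count_cons_self]
        push_cast
        ring
      have hgetdne : ¬ (counts.modify x 0 (· - 1)).getD x 0 = 0 := by
        rw [hgetd]
        have := List.count_pos_iff.mpr hxdrop
        omega
      simp only [hcontains, if_true, if_neg hgetdne]
      have hInv1 : InvA keywords cur (l + 1) (counts.modify x 0 (· - 1)) remaining := by
        refine ⟨?_, ?_, ?_⟩
        · intro y
          rw [PySem.Dict.contains_modify, hInv.1 y]
          by_cases hyx : y = x
          · subst hyx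
            simp [hxk, hxcur]
          · simp [hyx]
        · intro y hy
          rw [PySem.Dict.getD_modify]
          by_cases hyx : y = x
          · subst hyx
            rw [if_pos rfl, hInv.2.1 x hxk, List.drop_eq_getElem_cons hllt, ← hxdef,
              List.count_cons_self]
            push_cast; ring
          · rw [if_neg hyx, hInv.2.1 y hy, List.drop_eq_getElem_cons hllt, ← hxdef,
              List.count_cons_of_ne (Ne.symm hyx)]
        · rw [hInv.2.2, hcov1, covcnt_all keywords cur l hSK hall]
      obtain ⟨c₂, r₂, heq, hI, hr2⟩ :=
        ih (l + 1) (counts.modify x 0 (· - 1)) remaining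
          (if (r : Int) - (l : Int) < best.2 - best.1 then ((l : Int), (r : Int)) else best)
          (by omega) (by omega) hInv1
      refine ⟨c₂, r₂, ?_, hI, hr2⟩
      rw [show ((l : Int) + 1) = (((l + 1 : Nat)) : Int) by push_cast; ring, heq,
        hbest' _ rfl]
    · have hcontains : counts.contains x = false := by
        rw [hInv.1]
        simp [hxk]
      simp only [hcontains, Bool.false_eq_true, if_false]
      have hInv1 : InvA keywords cur (l + 1) counts remaining := by
        refine ⟨hInv.1, ?_, ?_⟩
        · intro y hy
          have hyx : y ≠ x := fun hh => hxk (hh ▸ hy)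
          rw [hInv.2.1 y hy, List.drop_eq_getElem_cons hllt, ← hxdef,
            List.count_cons_of_ne (Ne.symm hyx)]
        · rw [hInv.2.2, hcov1, covcnt_all keywords cur l hSK hall]
      obtain ⟨c₂, r₂, heq, hI, hr2⟩ :=
        ih (l + 1) counts remaining
          (if (r : Int) - (l : Int) < best.2 - best.1 then ((l : Int), (r : Int)) else best)
          (by omega) (by omega) hInv1
      refine ⟨c₂, r₂, ?_, hI, hr2⟩
      rw [show ((l : Int) + 1) = (((l + 1 : Nat)) : Int) by push_cast; ring, heq,
        hbest' _ rfl]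


-- processing a new keyword w: A's increment step preserves the invariant on pre ++ [w]
theorem stepInvA (keywords pre : List String) (w : String) (l : Nat)
    (counts : PySem.Dict String Int) (remaining : Int)
    (hw : w ∈ keywords) (hl : l ≤ pre.length)
    (hInv : InvA keywords pre l counts remaining) :
    InvA keywords (pre ++ [w]) l (counts.modify w 0 (· + 1))
      (if (counts.modify w 0 (· + 1)).getD w 0 = 1 then remaining - 1 else remaining) := by
  have hgw : (counts.modify w 0 (· + 1)).getD w 0 = (((pre.drop l).count w : Nat) : Int) + 1 := by
    rw [PySem.Dict.getD_modify_self, hInv.2.1 w hw]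
  refine ⟨?_, ?_, ?_⟩
  · intro y
    rw [PySem.Dict.contains_modify, hInv.1 y]
    by_cases hyw : y = w
    · subst hyw
      simp [hw]
    · have hmem : (y ∈ pre ++ [w]) ↔ (y ∈ pre) := by simp [List.mem_append, hyw]
      simp [hyw, hmem]
  · intro y hy
    rw [PySem.Dict.getD_modify, List.drop_append_of_le_length hl, List.count_append]
    by_cases hyw : y = w
    · subst hyw
      rw [if_pos rfl, hInv.2.1 y hy]
      simp [List.count_singleton]
    · rw [if_neg hyw, hInv.2.1 y hy]
      simp [List.count_cons, Ne.symm hyw]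
  · rw [covcnt_snoc keywords pre w l hl]
    have hwS : w ∈ keywords.dedup := List.mem_dedup.mpr hw
    by_cases hmem : w ∈ pre.drop l
    · have h1 : ¬ (counts.modify w 0 (· + 1)).getD w 0 = 1 := by
        rw [hgw]
        have := List.count_pos_iff.mpr hmem
        omega
      rw [if_neg h1,
        if_neg (show ¬(w ∈ keywords.dedup ∧ w ∉ pre.drop l) from by simp [hmem]),
        hInv.2.2]
      simp
    · have h1 : (counts.modify w 0 (· + 1)).getD w 0 = 1 := by
        rw [hgw, List.count_eq_zero.mpr hmem]
        simp
      rw [if_pos h1, if_pos ⟨hwS, hmem⟩, hInv.2.2]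
      push_cast
      ring
-- processing a non-keyword w preserves the invariant unchanged
theorem skipInvA (keywords pre : List String) (w : String) (l : Nat)
    (counts : PySem.Dict String Int) (remaining : Int)
    (hw : w ∉ keywords) (hl : l ≤ pre.length)
    (hInv : InvA keywords pre l counts remaining) :
    InvA keywords (pre ++ [w]) l counts remaining := by
  refine ⟨?_, ?_, ?_⟩
  · intro y
    rw [hInv.1 y]
    by_cases hyk : y ∈ keywords
    · have hyw : y ≠ w := fun h => hw (h ▸ hyk)
      have hmem : (y ∈ pre ++ [w]) ↔ (y ∈ pre) := by simp [List.mem_append, hyw]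
      simp [hmem]
    · simp [hyk]
  · intro y hy
    have hyw : y ≠ w := fun h => hw (h ▸ hy)
    rw [hInv.2.1 y hy, List.drop_append_of_le_length hl, List.count_append]
    simp [List.count_cons, Ne.symm hyw]
  · rw [hInv.2.2, covcnt_snoc keywords pre w l hl,
      if_neg (fun h => hw (List.mem_dedup.mp h.1))]
    simp

-- one-step unfoldings of the two loops
theorem pvGoA_cons (paragraph keywords : List String) (w : String) (rest' : List String)
    (right left : Int) (counts : PySem.Dict String Int) (remaining : Int) (best : Int × Int) :
    pvGoA paragraph keywords (w :: rest') right left counts remaining best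
      = if w ∈ keywords then
          pvGoA paragraph keywords rest' (right + 1)
            (pvWhileA paragraph right left (counts.modify w 0 (· + 1))
              (if (counts.modify w 0 (· + 1)).getD w 0 = 1 then remaining - 1 else remaining) best).1
            (pvWhileA paragraph right left (counts.modify w 0 (· + 1))
              (if (counts.modify w 0 (· + 1)).getD w 0 = 1 then remaining - 1 else remaining) best).2.1
            (pvWhileA paragraph right left (counts.modify w 0 (· + 1))
              (if (counts.modify w 0 (· + 1)).getD w 0 = 1 then remaining - 1 else remaining) best).2.2.1
            (pvWhileA paragraph right left (counts.modify w 0 (· + 1))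
              (if (counts.modify w 0 (· + 1)).getD w 0 = 1 then remaining - 1 else remaining) best).2.2.2
        else pvGoA paragraph keywords rest' (right + 1) left counts remaining best := rfl

theorem pvGoB_cons (keywords : List String) (w : String) (rest' : List String)
    (right : Int) (latest : PySem.Dict String Int) (best : Int × Int) :
    pvGoB keywords (w :: rest') right latest best
      = if w ∈ keywords then
          (if ((latest.insert w right).size : Int) = (keywords.length : Int) then
            pvGoB keywords rest' (right + 1) (latest.insert w right)
              (match PySem.List.min? (latest.insert w right).values (fun v => v) with
               | some start => if right - start < best.2 - best.1 then (start, right) else best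
               | none => best)
          else pvGoB keywords rest' (right + 1) (latest.insert w right) best)
        else pvGoB keywords rest' (right + 1) latest best := rfl

-- the main simulation: starting from matching states, both loops give the same answer
theorem main_eq (keywords : List String) (hK : keywords ≠ []) :
    ∀ (rest pre : List String) (l : Nat) (counts latest : PySem.Dict String Int)
      (remaining : Int) (best : Int × Int),
      l ≤ pre.length →
      InvA keywords pre l counts remaining →
      1 ≤ remaining →
      (∀ x : String, latest.get? x =
        if x ∈ keywords then liftIdx (lastIdx pre x) else none) →
      latest.keys.Nodup →
      (l = 0 ∨ best.2 - best.1 ≤ (pre.length : Int) - (l : Int)) →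
      pvGoA (pre ++ rest) keywords rest (pre.length : Int) (l : Int) counts remaining best
        = pvGoB keywords rest (pre.length : Int) latest best := by
  have hKpos : 0 < keywords.length := by
    cases keywords with
    | nil => exact absurd rfl hK
    | cons a t => simp
  intro rest
  induction rest with
  | nil => intro pre l counts latest remaining best _ _ _ _ _ _; rfl
  | cons w rest' ih =>
    intro pre l counts latest remaining best hl hInv hrem hlat hnd hbest
    have happ : pre ++ w :: rest' = (pre ++ [w]) ++ rest' := by simp
    have hcurlen : (pre ++ [w]).length = pre.length + 1 := by simp
    have hcastlen : (((pre ++ [w]).length : Nat) : Int) = (pre.length : Int) + 1 := by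
      rw [hcurlen]; push_cast; ring
    rw [happ, pvGoA_cons, pvGoB_cons]
    by_cases hw : w ∈ keywords
    · rw [if_pos hw, if_pos hw]
      have hlat' : ∀ x : String, (latest.insert w (pre.length : Int)).get? x =
          if x ∈ keywords then liftIdx (lastIdx (pre ++ [w]) x) else none := by
        intro x
        rw [PySem.Dict.get?_insert, lastIdx_snoc]
        by_cases hxw : x = w
        · rw [if_pos hxw, if_pos (by rw [hxw]; exact hw), if_pos hxw]
          rfl
        · rw [if_neg hxw, if_neg hxw, hlat x]
      have hnd' : (latest.insert w (pre.length : Int)).keys.Nodup :=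
        PySem.Dict.nodup_keys_insert _ _ _ hnd
      have hkeysmem : ∀ x : String,
          x ∈ (latest.insert w (pre.length : Int)).keys ↔ (x ∈ keywords ∧ x ∈ pre ++ [w]) := by
        intro x
        rw [← not_iff_not, ← PySem.Dict.get?_eq_none_iff_not_mem_keys, hlat' x]
        by_cases hxk : x ∈ keywords
        · rw [if_pos hxk]
          cases hli : lastIdx (pre ++ [w]) x with
          | none =>
            have hnx := (lastIdx_eq_none_iff _ _).mp hli
            simp [liftIdx, hxk, hnx]
          | some i =>
            have hmx : x ∈ pre ++ [w] := by
              obtain ⟨h1, h2, -⟩ := lastIdx_spec _ _ _ hli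
              exact List.mem_of_getElem? h2
            simp [liftIdx, hxk, hmx]
        · simp [hxk]
      have hsize : (latest.insert w (pre.length : Int)).size
          = keywords.dedup.countP (fun y => decide (y ∈ pre ++ [w])) := by
        have h1 : (latest.insert w (pre.length : Int)).size
            = (latest.insert w (pre.length : Int)).keys.length := by
          simp [PySem.Dict.size, PySem.Dict.keys]
        rw [h1, List.countP_eq_length_filter]
        refine List.Perm.length_eq ?_
        refine (List.perm_ext_iff_of_nodup hnd' (keywords.nodup_dedup.filter _)).mpr ?_
        intro a
        rw [hkeysmem a, List.mem_filter, List.mem_dedup]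
        simp
      have hInv1 : InvA keywords (pre ++ [w]) l (counts.modify w 0 (· + 1))
          (if (counts.modify w 0 (· + 1)).getD w 0 = 1 then remaining - 1 else remaining) :=
        stepInvA keywords pre w l counts remaining hw hl hInv
      have hcle : keywords.dedup.countP (fun y => decide (y ∈ pre ++ [w]))
          ≤ keywords.dedup.length := List.countP_le_length
      have hdle := dedup_len_le keywords
      by_cases hcnt : keywords.dedup.countP (fun y => decide (y ∈ pre ++ [w])) = keywords.length
      · -- B fires: every keyword occurs in pre ++ [w]
        have hBcond : (((latest.insert w (pre.length : Int)).size : Nat) : Int)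
            = (keywords.length : Int) := by
          rw [hsize, hcnt]
        rw [if_pos hBcond]
        have hSK : keywords.dedup.length = keywords.length := by omega
        have hallcur : ∀ k ∈ keywords.dedup, k ∈ pre ++ [w] := by
          have hh := List.countP_eq_length.mp
            (by omega : keywords.dedup.countP (fun y => decide (y ∈ pre ++ [w]))
              = keywords.dedup.length)
          intro k hk
          simpa using hh k hk
        have hvlen : (latest.insert w (pre.length : Int)).values.length
            = (latest.insert w (pre.length : Int)).size := by
          simp [PySem.Dict.values, PySem.Dict.size]
        have hvne : (latest.insert w (pre.length : Int)).values ≠ [] := by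
          intro hnil
          rw [hnil] at hvlen
          rw [hsize, hcnt] at hvlen
          simp at hvlen
          omega
        obtain ⟨mv, hmv⟩ : ∃ mv, PySem.List.min?
            (latest.insert w (pre.length : Int)).values (fun v => v) = some mv := by
          cases h : PySem.List.min? (latest.insert w (pre.length : Int)).values (fun v => v) with
          | none => exact absurd ((PySem.List.min?_eq_none_iff _ _).mp h) hvne
          | some v => exact ⟨v, rfl⟩
        have hmvmem := PySem.List.min?_mem hmv
        obtain ⟨p, hpmem, hpv⟩ := List.mem_map.mp (by
          simpa [PySem.Dict.values] using hmvmem :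
            mv ∈ (latest.insert w (pre.length : Int)).items.map (fun q => q.2))
        have hget1 : (latest.insert w (pre.length : Int)).get? p.1 = some mv := by
          rw [← hpv]
          exact PySem.Dict.get?_of_mem_items _ (by simpa using hpmem) hnd'
        rw [hlat' p.1] at hget1
        by_cases hp1k : p.1 ∈ keywords
        case neg => rw [if_neg hp1k] at hget1; cases hget1
        rw [if_pos hp1k] at hget1
        obtain ⟨m, hlast, hcast⟩ :
            ∃ m, lastIdx (pre ++ [w]) p.1 = some m ∧ ((m : Nat) : Int) = mv := by
          cases hli : lastIdx (pre ++ [w]) p.1 with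
          | none => rw [hli] at hget1; cases hget1
          | some m0 =>
            rw [hli] at hget1
            simp only [liftIdx, Option.map_some, Option.some.injEq] at hget1
            exact ⟨m0, rfl, by omega⟩
        have hmlt : m < (pre ++ [w]).length := (lastIdx_spec _ _ _ hlast).1
        have hm : ∃ k ∈ keywords.dedup, lastIdx (pre ++ [w]) k = some m :=
          ⟨p.1, List.mem_dedup.mpr hp1k, hlast⟩
        have hminAll : ∀ k ∈ keywords.dedup, ∃ i, lastIdx (pre ++ [w]) k = some i ∧ m ≤ i := by
          intro k hk
          have hkk : k ∈ keywords := List.mem_dedup.mp hk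
          have hkc : k ∈ pre ++ [w] := hallcur k hk
          cases hli : lastIdx (pre ++ [w]) k with
          | none => exact absurd hkc ((lastIdx_eq_none_iff _ _).mp hli)
          | some i =>
            refine ⟨i, rfl, ?_⟩
            have hgk : (latest.insert w (pre.length : Int)).get? k = some (i : Int) := by
              rw [hlat' k, if_pos hkk, hli]
              rfl
            have hiv : ((i : Nat) : Int) ∈ (latest.insert w (pre.length : Int)).values := by
              have hit := PySem.Dict.mem_items_of_get?_eq_some _ hgk
              have := List.mem_map_of_mem (f := fun q : String × Int => q.2) hit
              simpa [PySem.Dict.values] using this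
            have hle := PySem.List.min?_isMin hmv _ hiv
            simp only at hle
            rw [← hcast] at hle
            exact_mod_cast hle
        rw [hmv]
        simp only []
        rw [← hcast]
        by_cases hlm : l ≤ m
        · -- A fires too
          have hallwin : ∀ k ∈ keywords.dedup, k ∈ (pre ++ [w]).drop l := by
            intro k hk
            obtain ⟨i, hi, hmi⟩ := hminAll k hk
            exact (mem_drop_iff_lastIdx _ _ _).mpr ⟨i, hi, by omega⟩
          have hrem1 : (if (counts.modify w 0 (· + 1)).getD w 0 = 1
              then remaining - 1 else remaining) = 0 := by
            rw [hInv1.2.2, covcnt_all keywords (pre ++ [w]) l hSK hallwin]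
            omega
          obtain ⟨c₂, r₂, heqw, hI2, hge2⟩ :=
            whileA_spec keywords (pre ++ [w]) rest' pre.length hcurlen hSK m hm hminAll
              (m - l) l (counts.modify w 0 (· + 1))
              (if (counts.modify w 0 (· + 1)).getD w 0 = 1 then remaining - 1 else remaining)
              best rfl hlm hInv1
          rw [heqw]
          have hb2 : (m + 1 = 0) ∨
              ((if (pre.length : Int) - (m : Int) < best.2 - best.1
                 then ((m : Int), (pre.length : Int)) else best).2
               - (if (pre.length : Int) - (m : Int) < best.2 - best.1
                 then ((m : Int), (pre.length : Int)) else best).1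
               ≤ ((pre ++ [w]).length : Int) - ((m + 1 : Nat) : Int)) := by
            refine Or.inr ?_
            rw [hcurlen]
            by_cases hfb : (pre.length : Int) - (m : Int) < best.2 - best.1
            · rw [if_pos hfb]
              push_cast
              omega
            · rw [if_neg hfb]
              push_cast
              omega
          have hih := ih (pre ++ [w]) (m + 1) c₂ (latest.insert w (pre.length : Int)) r₂
            (if (pre.length : Int) - (m : Int) < best.2 - best.1
              then ((m : Int), (pre.length : Int)) else best)
            (by rw [hcurlen]; omega) hI2 hge2 hlat' hnd' hb2
          rw [hcastlen] at hih
          rw [show (((m + 1 : Nat)) : Int) = (m : Int) + 1 by push_cast; ring] at hih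
          exact hih
        · -- m < l : A's window no longer covers; B's candidate is too long
          rcases hbest with h0 | hb
          · exact absurd (by omega) hlm
          obtain ⟨k0, hk0S, hk0⟩ := hm
          have hk0not : k0 ∉ (pre ++ [w]).drop l := by
            intro hmem
            obtain ⟨i, hi, hli⟩ := (mem_drop_iff_lastIdx _ _ _).mp hmem
            rw [hk0] at hi
            cases hi
            omega
          have hltc := covcnt_lt keywords (pre ++ [w]) l k0 hk0S hk0not
          have hrem1pos : 1 ≤ (if (counts.modify w 0 (· + 1)).getD w 0 = 1
              then remaining - 1 else remaining) := by
            rw [hInv1.2.2]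
            omega
          rw [pvWhileA, dif_neg (fun hcond => by omega)]
          simp only []
          rw [if_neg (show ¬((pre.length : Int) - (m : Int) < best.2 - best.1) by omega)]
          have hih := ih (pre ++ [w]) l (counts.modify w 0 (· + 1))
            (latest.insert w (pre.length : Int))
            (if (counts.modify w 0 (· + 1)).getD w 0 = 1 then remaining - 1 else remaining)
            best (by rw [hcurlen]; omega) hInv1 hrem1pos hlat' hnd'
            (Or.inr (by rw [hcurlen]; push_cast; omega))
          rw [hcastlen] at hih
          exact hih
      · -- B does not fire, and A's window cannot cover either
        have hBcond' : ¬ (((latest.insert w (pre.length : Int)).size : Nat) : Int)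
            = (keywords.length : Int) := by
          rw [hsize]
          exact_mod_cast hcnt
        rw [if_neg hBcond']
        have hwle : covcnt keywords (pre ++ [w]) l
            ≤ keywords.dedup.countP (fun y => decide (y ∈ pre ++ [w])) := by
          unfold covcnt
          refine List.countP_mono_left ?_
          intro y _ hy
          simp only [decide_eq_true_eq] at hy ⊢
          exact List.mem_of_mem_drop hy
        have hrem1pos : 1 ≤ (if (counts.modify w 0 (· + 1)).getD w 0 = 1
            then remaining - 1 else remaining) := by
          rw [hInv1.2.2]
          omega
        rw [pvWhileA, dif_neg (fun hcond => by omega)]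
        simp only []
        have hih := ih (pre ++ [w]) l (counts.modify w 0 (· + 1))
          (latest.insert w (pre.length : Int))
          (if (counts.modify w 0 (· + 1)).getD w 0 = 1 then remaining - 1 else remaining)
          best (by rw [hcurlen]; omega) hInv1 hrem1pos hlat' hnd'
          (hbest.imp id (fun hb => by rw [hcurlen]; push_cast; push_cast at hb; omega))
        rw [hcastlen] at hih
        exact hih
    · -- w is not a keyword: both loops just move on
      rw [if_neg hw, if_neg hw]
      have hlatsk : ∀ x : String, latest.get? x =
          if x ∈ keywords then liftIdx (lastIdx (pre ++ [w]) x) else none := by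
        intro x
        by_cases hxk : x ∈ keywords
        · have hxw : ¬ x = w := fun h => hw (h ▸ hxk)
          rw [hlat x, if_pos hxk, if_pos hxk, lastIdx_snoc, if_neg hxw]
        · rw [hlat x, if_neg hxk, if_neg hxk]
      have hih := ih (pre ++ [w]) l counts latest remaining best
        (by rw [hcurlen]; omega)
        (skipInvA keywords pre w l counts remaining hw hl hInv)
        hrem hlatsk hnd
        (hbest.imp id (fun hb => by rw [hcurlen]; push_cast; push_cast at hb; omega))
      rw [hcastlen] at hih
      exact hih

-- with no keywords neither loop ever does anything
theorem goA_keywords_nil (paragraph : List String) :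
    ∀ (rest : List String) (right left : Int) (counts : PySem.Dict String Int)
      (remaining : Int) (best : Int × Int),
      pvGoA paragraph [] rest right left counts remaining best = best := by
  intro rest
  induction rest with
  | nil => intro right left counts remaining best; rfl
  | cons w rest' ih =>
    intro right left counts remaining best
    rw [pvGoA_cons, if_neg (List.not_mem_nil)]
    exact ih _ _ _ _ _

theorem goB_keywords_nil :
    ∀ (rest : List String) (right : Int) (latest : PySem.Dict String Int) (best : Int × Int),
      pvGoB [] rest right latest best = best := by
  intro rest
  induction rest with
  | nil => intro right latest best; rfl
  | cons w rest' ih =>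
    intro right latest best
    rw [pvGoB_cons, if_neg (List.not_mem_nil)]
    exact ih _ _ _

-- ===== VERDICT (by name: the statement is the Claim_ definition above) =====
theorem find_smallest_subarray_covering_set_spec : Claim_equal_find_smallest_subarray_covering_set := by
  unfold Claim_equal_find_smallest_subarray_covering_set
  intro paragraph keywords _
  unfold Spec_find_smallest_subarray_covering_set
  unfold find_smallest_subarray_covering_set find_smallest_subarray_covering_set_alt
  by_cases hK : keywords = []
  · subst hK
    rw [goA_keywords_nil, goB_keywords_nil]
  · have h0 := main_eq keywords hK paragraph [] 0 PySem.Dict.empty PySem.Dict.empty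
      ((keywords.length : Nat) : Int) (-1, (paragraph.length : Int) + 1)
      (by simp)
      ⟨by intro x; simp [PySem.Dict.contains_empty],
       by intro x _; simp [PySem.Dict.getD_empty],
       by simp [covcnt]⟩
      (by
        have hpos : 0 < keywords.length := by
          cases keywords with
          | nil => exact absurd rfl hK
          | cons a t => simp
        exact_mod_cast hpos)
      (by intro x; simp [PySem.Dict.get?_empty, lastIdx, liftIdx])
      PySem.Dict.nodup_keys_empty
      (Or.inl rfl)
    simp only [List.nil_append, List.length_nil, Nat.cast_zero] at h0
    rw [h0]
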